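-- pv_equiv track=rewrite | github.com/syaheer-altaf/rag_4_cpr | solutions/id98.py | find_square_anagram_pairs
-- ===== SOURCE A (Python) =====
-- import math
--
-- def is_square(n):
--     return int(math.isqrt(n)) ** 2 == n
--
-- def find_square_anagram_pairs(words):
--     anagrams = {}
--     for word in words:
--         sorted_word = ''.join(sorted(word))
--         if sorted_word not in anagrams:
--             anagrams[sorted_word] = []
--         anagrams[sorted_word].append(word)
--
--     largest_square = 0
--     for word_list in anagrams.values():
--         for i in range(len(word_list)):
--             for j in range(i + 1, len(word_list)):
--                 largest_square = max(largest_square, max_square_pair(word_list[i], word_list[j]))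
--
--     return largest_square
--
-- def max_square_pair(word1, word2):
--     assignments = {}
--     used_digits = [False] * 10
--     return backtrack(word1, word2, 0, assignments, used_digits)
--
-- def backtrack(word1, word2, index, assignments, used_digits):
--     if index == len(word1):
--         if (word1[0] in assignments and assignments[word1[0]] == 0) or (word2[0] in assignments and assignments[word2[0]] == 0):
--             return 0
--
--         num1, num2 = 0, 0
--         for c1, c2 in zip(word1, word2):
--             num1 = num1 * 10 + assignments[c1]
--             num2 = num2 * 10 + assignments[c2]
--
--         if is_square(num1) and is_square(num2):
--             return max(num1, num2)
--         return 0
--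
--     if word1[index] in assignments:
--         return backtrack(word1, word2, index + 1, assignments, used_digits)
--
--     result = 0
--     for i in range(10):
--         if not used_digits[i]:
--             used_digits[i] = True
--             assignments[word1[index]] = i
--             result = max(result, backtrack(word1, word2, index + 1, assignments, used_digits))
--             del assignments[word1[index]]
--             used_digits[i] = False
--
--     return result
-- ===== SOURCE B (Python) =====
-- import math
-- from itertools import permutations
--
-- def is_square(n):
--     return int(math.isqrt(n)) ** 2 == n
--
-- def find_square_anagram_pairs(words):
--     anagrams = {}
--     for word in words:
--         key = ''.join(sorted(word))
--         anagrams.setdefault(key, []).append(word)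
--
--     best = 0
--     for word_list in anagrams.values():
--         for i in range(len(word_list)):
--             for j in range(i + 1, len(word_list)):
--                 best = max(best, best_square_pair(word_list[i], word_list[j]))
--     return best
--
-- def best_square_pair(word1, word2):
--     letters = list(dict.fromkeys(word1))
--     best = 0
--     for perm in permutations(range(10), len(letters)):
--         digit = dict(zip(letters, perm))
--         if digit[word1[0]] == 0 or digit[word2[0]] == 0:
--             continue
--         num1, num2 = 0, 0
--         for c1, c2 in zip(word1, word2):
--             num1 = num1 * 10 + digit[c1]
--             num2 = num2 * 10 + digit[c2]
--         if is_square(num1) and is_square(num2):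
--             best = max(best, num1, num2)
--     return best
-- ===== Notes on version B (the rewrite author's own statement) =====
-- stated objective: alternative
-- what changed: Replaced the recursive backtracking search (mutable assignment dict + used-digit list, undo after each branch) by a flat loop over itertools.permutations(range(10), k) of the word's distinct letters, building each complete letter-to-digit mapping at once.
-- outside the precondition, e.g. on find_square_anagram_pairs(['', '']): A raises IndexError, B raises IndexError
import Mathlib
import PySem

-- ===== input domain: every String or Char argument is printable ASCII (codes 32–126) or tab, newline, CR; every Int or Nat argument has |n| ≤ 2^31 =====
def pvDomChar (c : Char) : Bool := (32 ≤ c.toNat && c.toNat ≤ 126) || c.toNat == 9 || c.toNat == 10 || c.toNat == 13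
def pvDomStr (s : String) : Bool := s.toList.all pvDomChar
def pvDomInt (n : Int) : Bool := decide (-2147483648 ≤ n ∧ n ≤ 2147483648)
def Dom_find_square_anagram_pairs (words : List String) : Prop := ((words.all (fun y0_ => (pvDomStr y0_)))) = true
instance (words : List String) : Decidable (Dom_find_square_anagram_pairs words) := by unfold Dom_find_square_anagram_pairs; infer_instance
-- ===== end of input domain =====

-- B replaces A's recursive backtracking (mutable assignment dict + used-digit array) by a flat
-- enumeration of itertools.permutations of digits over the distinct letters; alternative structure, same cost.

-- ===== PORT A =====

-- is_square(n) = int(math.isqrt(n)) ** 2 == n  (math.isqrt raises for n < 0; every n passed here is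
-- built from digits 0-9, hence ≥ 0, so Nat.sqrt n.toNat is exact).  Source B contains the identical helper.
def is_square (n : Int) : Bool := ((Nat.sqrt n.toNat : Int)) ^ 2 == n

def sortedJoin (w : String) : String := String.ofList (PySem.List.sorted w.toList (fun c => c) false)

-- backtrack(word1, word2, index, assignments, used_digits); Python's index stays within 0..len(word1),
-- ported as Nat.  The mutate/recurse/undo pattern on assignments and used_digits is ported by passing
-- the updated values only into the recursive call.
def pyBacktrack (w1 w2 : List Char) (index : Nat) (a : PySem.Dict Char Int) (used : List Bool) : Int :=
  if index = w1.length then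
    if ((match PySem.List.pyGet? w1 0 with
          | some c => (match a.get? c with | some v => v == 0 | none => false)
          | none => false)
        || (match PySem.List.pyGet? w2 0 with
          | some c => (match a.get? c with | some v => v == 0 | none => false)
          | none => false)) then 0
    else
      let p := (w1.zip w2).foldl
        (fun (p : Int × Int) cc => (p.1 * 10 + a.getD cc.1 0, p.2 * 10 + a.getD cc.2 0)) (0, 0)
      if is_square p.1 && is_square p.2 then max p.1 p.2 else 0
  else
    match h : PySem.List.pyGet? w1 (index : Int) with
    | none => 0
    | some c =>
      if a.contains c then pyBacktrack w1 w2 (index + 1) a used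
      else
        (PySem.List.pyRange 0 10).foldl
          (fun result i =>
            if !(PySem.List.pyGetD used i false) then
              max result (pyBacktrack w1 w2 (index + 1) (a.insert c i) (used.set i.toNat true))
            else result) 0
termination_by w1.length - index
decreasing_by
  all_goals
    simp only [PySem.List.pyGet?_natCast] at h
    obtain ⟨h1, -⟩ := List.getElem?_eq_some_iff.mp h
    omega

def max_square_pair (word1 word2 : String) : Int :=
  pyBacktrack word1.toList word2.toList 0 PySem.Dict.empty (List.replicate 10 false)

def find_square_anagram_pairs (words : List String) : Int :=
  let anagrams := words.foldl (fun d word =>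
      let sw := sortedJoin word
      let d := if d.contains sw then d else d.insert sw ([] : List String)
      d.insert sw (d.getD sw [] ++ [word])) PySem.Dict.empty
  (anagrams.values).foldl (fun largest wl =>
    (PySem.List.pyRange 0 (wl.length : Int)).foldl (fun largest i =>
      (PySem.List.pyRange (i + 1) (wl.length : Int)).foldl (fun largest j =>
        max largest (max_square_pair (PySem.List.pyGetD wl i "") (PySem.List.pyGetD wl j ""))) largest) largest) 0


-- ===== PORT B =====

-- best_square_pair(word1, word2) from Source B: flat loop over permutations(range(10), len(letters)).
def best_square_pair (word1 word2 : String) : Int :=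
  let w1 := word1.toList
  let w2 := word2.toList
  let letters := PySem.List.dedup w1
  (PySem.List.permutations (PySem.List.pyRange 0 10) letters.length).foldl
    (fun best perm =>
      let digit := PySem.Dict.ofList (letters.zip perm)
      let d1 := match PySem.List.pyGet? w1 0 with
        | some c => digit.getD c 0
        | none => 0
      let d2 := match PySem.List.pyGet? w2 0 with
        | some c => digit.getD c 0
        | none => 0
      if d1 == 0 || d2 == 0 then best
      else
        let p := (w1.zip w2).foldl
          (fun (p : Int × Int) cc => (p.1 * 10 + digit.getD cc.1 0, p.2 * 10 + digit.getD cc.2 0)) (0, 0)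
        if is_square p.1 && is_square p.2 then max best (max p.1 p.2) else best) 0

def find_square_anagram_pairs_alt (words : List String) : Int :=
  let anagrams := words.foldl (fun d word =>
      let sw := sortedJoin word
      let d := d.setdefault sw ([] : List String)
      d.insert sw (d.getD sw [] ++ [word])) PySem.Dict.empty
  (anagrams.values).foldl (fun best wl =>
    (PySem.List.pyRange 0 (wl.length : Int)).foldl (fun best i =>
      (PySem.List.pyRange (i + 1) (wl.length : Int)).foldl (fun best j =>
        max best (best_square_pair (PySem.List.pyGetD wl i "") (PySem.List.pyGetD wl j ""))) best) best) 0


-- ===== PRECONDITION & SPEC =====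
-- Pre_ excludes lists containing two or more empty strings: there the two empty words form an anagram
-- pair and both Pythons raise IndexError on word1[0].
def Pre_find_square_anagram_pairs (words : List String) : Prop := words.count "" ≤ 1
instance (words : List String) : Decidable (Pre_find_square_anagram_pairs words) := by
  unfold Pre_find_square_anagram_pairs; infer_instance

def pvWitness_find_square_anagram_pairs : List String := ["ab", "ba"]

def Spec_find_square_anagram_pairs (words : List String) (out : Int) : Prop := out = find_square_anagram_pairs_alt words
instance (words : List String) (out : Int) : Decidable (Spec_find_square_anagram_pairs words out) := by unfold Spec_find_square_anagram_pairs; infer_instance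

-- ===== CLAIM (what is proved, stated in full; the proofs are below) =====
def Claim_equal_find_square_anagram_pairs : Prop := ∀ (words : List String), Dom_find_square_anagram_pairs words → Pre_find_square_anagram_pairs words → Spec_find_square_anagram_pairs words (find_square_anagram_pairs words)

-- ===== LEMMAS AND PROOFS =====

-- The value contributed by one complete letter→digit dictionary (the body of B's loop from best = 0).
def gval (w1 w2 : List Char) (digit : PySem.Dict Char Int) : Int :=
  let d1 := match PySem.List.pyGet? w1 0 with | some c => digit.getD c 0 | none => 0
  let d2 := match PySem.List.pyGet? w2 0 with | some c => digit.getD c 0 | none => 0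
  if d1 == 0 || d2 == 0 then 0
  else
    let p := (w1.zip w2).foldl
      (fun (p : Int × Int) cc => (p.1 * 10 + digit.getD cc.1 0, p.2 * 10 + digit.getD cc.2 0)) (0, 0)
    if is_square p.1 && is_square p.2 then max p.1 p.2 else 0

-- The distinct characters of the argument that are not yet keys, in first-occurrence order.
def remNew (K : List Char) : List Char → List Char
  | [] => []
  | c :: l => if c ∈ K then remNew K l else c :: remNew (K ++ [c]) l

def extendD (a : PySem.Dict Char Int) (ps : List (Char × Int)) : PySem.Dict Char Int :=
  ps.foldl (fun d p => d.insert p.1 p.2) a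

-- The digits not yet marked used, in increasing order.
def poolOf (u : List Bool) : List Int :=
  (PySem.List.pyRange 0 10).filter (fun i => !(PySem.List.pyGetD u i false))

lemma is_square_nonneg {n : Int} (h : is_square n = true) : 0 ≤ n := by
  have := eq_of_beq h
  rw [← this]; positivity

lemma gval_nonneg (w1 w2 : List Char) (d : PySem.Dict Char Int) : 0 ≤ gval w1 w2 d := by
  unfold gval
  dsimp only
  split_ifs with h1 h2
  · exact le_refl (0:Int)
  · simp only [Bool.and_eq_true] at h2
    exact le_trans (is_square_nonneg h2.1) (le_max_left _ _)
  · exact le_refl (0:Int)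

lemma foldl_max_assoc {α : Type} (g : α → Int) (l : List α) (a r : Int) :
    l.foldl (fun b p => max b (g p)) (max a r) = max a (l.foldl (fun b p => max b (g p)) r) := by
  induction l generalizing r with
  | nil => rfl
  | cons p t ih => simp only [List.foldl_cons, max_assoc, ih]

lemma foldl_max_shift {α : Type} (g : α → Int) (l : List α) (r : Int) (hr : 0 ≤ r) :
    l.foldl (fun b p => max b (g p)) r = max r (l.foldl (fun b p => max b (g p)) 0) := by
  rw [← foldl_max_assoc g l r 0, max_eq_left hr]

lemma foldl_eq_of_inv {α : Type} (f g : Int → α → Int) (P : Int → Prop) (l : List α)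
    (h : ∀ b, P b → ∀ x ∈ l, f b x = g b x ∧ P (f b x)) :
    ∀ b, P b → l.foldl f b = l.foldl g b := by
  induction l with
  | nil => intros; rfl
  | cons x t ih =>
    intro b hb
    have hx := h b hb x (by simp)
    simp only [List.foldl_cons, hx.1]
    exact ih (fun b hb y hy => h b hb y (by simp [hy])) _ (hx.1 ▸ hx.2)

lemma flatMap_range_getElem {β : Type} (xs : List Int) (hnd : xs.Nodup) (F : Int → List Int → List β) :
    (List.range xs.length).flatMap (fun j =>
        match xs[j]? with
        | none => []
        | some x => F x (xs.eraseIdx j))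
    = xs.flatMap (fun x => F x (xs.erase x)) := by
  induction xs generalizing F with
  | nil => rfl
  | cons x t ih =>
    rw [List.length_cons, List.range_succ_eq_map, List.flatMap_cons, List.flatMap_map]
    simp only [List.getElem?_cons_succ, List.getElem?_cons_zero, List.eraseIdx_cons_succ,
      List.eraseIdx_cons_zero]
    rw [List.flatMap_cons, List.erase_cons_head]
    congr 1
    rw [ih (List.nodup_cons.mp hnd).2 (fun y l => F y (x :: l))]
    apply List.flatMap_congr
    intro y hy
    have hyx : y ≠ x := fun e => (List.nodup_cons.mp hnd).1 (e ▸ hy)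
    rw [List.erase_cons_tail (by simpa using (Ne.symm hyx))]

lemma perms_succ_nodup (xs : List Int) (hnd : xs.Nodup) (r : Nat) :
    PySem.List.permutations xs (r+1)
      = xs.flatMap (fun x => (PySem.List.permutations (xs.erase x) r).map (fun p => x :: p)) := by
  rw [PySem.List.permutations]
  rw [← flatMap_range_getElem xs hnd (fun x l => (PySem.List.permutations l r).map (fun p => x :: p))]
  apply List.flatMap_congr
  intro j hj
  cases h : xs[j]? <;> simp

lemma filter_and_ne_erase (l : List Int) (hnd : l.Nodup) (p : Int → Bool) (i : Int) :
    l.filter (fun x => p x && !(x == i)) = (l.filter p).erase i := by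
  induction l with
  | nil => rfl
  | cons x t ih =>
    have ht := (List.nodup_cons.mp hnd).2
    have notin := (List.nodup_cons.mp hnd).1
    by_cases hxi : x = i
    · subst hxi
      have hfix : List.filter (fun y => p y && !(y == x)) t = List.filter p t := by
        apply List.filter_congr
        intro y hy
        have : y ≠ x := fun e => notin (e ▸ hy)
        simp [this]
      by_cases hp : p x
      · simp [List.filter_cons, hp, hfix, List.erase_cons_head]
      · simp only [List.filter_cons, BEq.rfl, Bool.not_true, Bool.and_false, hp,
          if_false, hfix, Bool.false_eq_true]
        rw [List.erase_of_not_mem (by simp [List.mem_filter]; intro h; exact absurd h notin)]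
    · have hbe : (x == i) = false := by simp [hxi]
      by_cases hp : p x
      · simp only [List.filter_cons, hp, hbe, Bool.not_false, Bool.and_true, if_true]
        rw [List.erase_cons_tail (by simp [hxi]), ih ht]
      · simp [List.filter_cons, hp, ih ht]

lemma poolOf_nodup (u : List Bool) : (poolOf u).Nodup :=
  List.Nodup.filter _ (by decide)

lemma poolOf_set (u : List Bool) (i : Int) (h0 : 0 ≤ i) (hi : i.toNat < u.length) :
    poolOf (u.set i.toNat true) = (poolOf u).erase i := by
  unfold poolOf
  rw [← filter_and_ne_erase _ (by decide)]
  apply List.filter_congr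
  intro x hx
  have hx' : 0 ≤ x ∧ x < 10 := PySem.List.mem_pyRange_one.mp hx
  by_cases hxi : x = i
  · subst hxi
    have : PySem.List.pyGetD (u.set x.toNat true) x false = true := by
      rw [show x = ((x.toNat : Nat) : Int) from by omega, PySem.List.pyGetD_natCast]
      rw [show ((((x.toNat:Nat):Int)).toNat) = x.toNat from by omega]
      simp [List.getD, hi]
    simp [this]
  · have hne : x.toNat ≠ i.toNat := by omega
    have : PySem.List.pyGetD (u.set i.toNat true) x false = PySem.List.pyGetD u x false := by
      rw [show x = ((x.toNat : Nat) : Int) from by omega, PySem.List.pyGetD_natCast, PySem.List.pyGetD_natCast]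
      simp [List.getD, List.getElem?_set_ne (Ne.symm hne)]
    simp [this, hxi]

lemma leaf_eq (w1 w2 : List Char) (a : PySem.Dict Char Int)
    (hsub : ∀ c ∈ w2, c ∈ w1) (hcov : ∀ c ∈ w1, a.contains c = true) :
    (if ((match PySem.List.pyGet? w1 0 with
          | some c => (match a.get? c with | some v => v == 0 | none => false)
          | none => false)
        || (match PySem.List.pyGet? w2 0 with
          | some c => (match a.get? c with | some v => v == 0 | none => false)
          | none => false)) then (0:Int)
     else
      let p := (w1.zip w2).foldl
        (fun (p : Int × Int) cc => (p.1 * 10 + a.getD cc.1 0, p.2 * 10 + a.getD cc.2 0)) (0, 0)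
      if is_square p.1 && is_square p.2 then max p.1 p.2 else 0)
    = gval w1 w2 a := by
  unfold gval
  match hw1 : w1 with
  | [] =>
    have hw2 : w2 = [] := by
      cases h2 : w2 with
      | nil => rfl
      | cons c t => exact absurd (hsub c (by simp [h2])) (by simp)
    subst hw2
    simp [PySem.List.pyGet?, PySem.List.pyIdx?, is_square, Nat.sqrt]
  | c1 :: t1 =>
    have hc1 := hcov c1 (by simp)
    rw [PySem.Dict.contains_eq_isSome_get?] at hc1
    obtain ⟨v1, hv1⟩ := Option.isSome_iff_exists.mp hc1
    have hget1 : PySem.List.pyGet? (c1 :: t1) 0 = some c1 := by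
      simpa using PySem.List.pyGet?_natCast (c1 :: t1) 0
    have hd1 : PySem.Dict.getD a c1 0 = v1 := PySem.Dict.getD_of_get?_eq_some _ _ hv1
    match hw2 : w2 with
    | [] =>
      have hget2 : PySem.List.pyGet? ([] : List Char) 0 = none := by decide
      simp only [hget1, hget2, hv1]
      by_cases hz : v1 = 0
      · simp [hz]
      · have : (v1 == 0) = false := by simp [hz]
        simp [this, List.zip_nil_right, List.foldl_nil, is_square]
    | c2 :: t2 =>
      have hc2 := hcov c2 (hsub c2 (by simp))
      rw [PySem.Dict.contains_eq_isSome_get?] at hc2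
      obtain ⟨v2, hv2⟩ := Option.isSome_iff_exists.mp hc2
      have hget2 : PySem.List.pyGet? (c2 :: t2) 0 = some c2 := by
        simpa using PySem.List.pyGet?_natCast (c2 :: t2) 0
      have hd2 : PySem.Dict.getD a c2 0 = v2 := PySem.Dict.getD_of_get?_eq_some _ _ hv2
      simp only [hget1, hget2, hv1, hv2, hd1, hd2]

lemma remNew_cons (K : List Char) (c : Char) (l : List Char) :
    remNew K (c :: l) = if c ∈ K then remNew K l else c :: remNew (K ++ [c]) l := rfl

lemma bt_case_leaf (w1 w2 : List Char) (hsub : ∀ c ∈ w2, c ∈ w1)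
    (a : PySem.Dict Char Int) (u : List Bool)
    (hcov : ∀ c ∈ w1.take w1.length, a.contains c = true) :
    pyBacktrack w1 w2 w1.length a u
      = (PySem.List.permutations (poolOf u) (remNew a.keys (w1.drop w1.length)).length).foldl
          (fun best perm =>
            max best (gval w1 w2 (extendD a ((remNew a.keys (w1.drop w1.length)).zip perm)))) 0 := by
  rw [pyBacktrack, if_pos rfl]
  rw [List.drop_length]
  have hrem : remNew a.keys [] = [] := rfl
  rw [hrem]
  show _ = max 0 (gval w1 w2 (extendD a ([].zip ([] : List Int))))
  rw [show ([] : List Char).zip ([] : List Int) = [] from rfl]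
  rw [show extendD a [] = a from rfl]
  rw [max_eq_right (gval_nonneg w1 w2 a)]
  exact leaf_eq w1 w2 a hsub (fun c hc => hcov c (by simpa using hc))

lemma bt_eq (w1 w2 : List Char) (hsub : ∀ c ∈ w2, c ∈ w1) :
    ∀ (fuel index : Nat) (a : PySem.Dict Char Int) (u : List Bool),
      w1.length - index ≤ fuel → index ≤ w1.length → u.length = 10 →
      (∀ c ∈ w1.take index, a.contains c = true) →
      pyBacktrack w1 w2 index a u
        = (PySem.List.permutations (poolOf u) (remNew a.keys (w1.drop index)).length).foldl
            (fun best perm =>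
              max best (gval w1 w2 (extendD a ((remNew a.keys (w1.drop index)).zip perm)))) 0 := by
  intro fuel
  induction fuel with
  | zero =>
    intro index a u hfuel hle hu hcov
    have hidx : index = w1.length := by omega
    subst hidx
    exact bt_case_leaf w1 w2 hsub a u hcov
  | succ fuel ih =>
    intro index a u hfuel hle hu hcov
    by_cases hidx : index = w1.length
    · subst hidx
      exact bt_case_leaf w1 w2 hsub a u hcov
    · have hlt : index < w1.length := lt_of_le_of_ne hle hidx
      have hget : PySem.List.pyGet? w1 (index : Int) = some w1[index] := by
        rw [PySem.List.pyGet?_natCast]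
        exact List.getElem?_eq_getElem hlt
      have hdrop : w1.drop index = w1[index] :: w1.drop (index+1) := List.drop_eq_getElem_cons hlt
      have hcov' : ∀ i : Int, ∀ c ∈ w1.take (index+1), (a.insert w1[index] i).contains c = true := by
        intro i c hc
        rw [List.take_succ] at hc
        rcases List.mem_append.mp hc with h | h
        · rw [PySem.Dict.contains_insert]
          simp [hcov c h]
        · have hcw : c = w1[index] := by
            rw [List.getElem?_eq_getElem hlt] at h
            simpa using h
          rw [hcw]
          exact PySem.Dict.contains_insert_self a _ i
      rw [pyBacktrack, if_neg hidx]
      split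
      case _ heq => rw [hget] at heq; exact absurd heq (by simp)
      case _ c heq =>
      rw [hget] at heq
      have hc : c = w1[index] := by injection heq with h'; exact h'.symm
      subst hc
      by_cases hcont : a.contains w1[index]
      · rw [if_pos hcont]
        have hmem : w1[index] ∈ a.keys := (PySem.Dict.contains_iff_mem_keys a w1[index]).mp hcont
        have hrem : remNew a.keys (w1.drop index) = remNew a.keys (w1.drop (index+1)) := by
          rw [hdrop, remNew_cons, if_pos hmem]
        rw [hrem]
        refine ih (index+1) a u (by omega) (by omega) hu ?_
        intro c hc
        rw [List.take_succ] at hc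
        rcases List.mem_append.mp hc with h | h
        · exact hcov c h
        · have : c = w1[index] := by
            rw [List.getElem?_eq_getElem hlt] at h
            simpa using h
          rw [this]
          exact hcont
      · rw [if_neg hcont]
        have hcontf : a.contains w1[index] = false := by
          revert hcont; cases a.contains w1[index] <;> simp
        have hnotmem : w1[index] ∉ a.keys := by
          intro hm
          rw [(PySem.Dict.contains_iff_mem_keys a w1[index]).mpr hm] at hcontf
          simp at hcontf
        have hkeys : ∀ i : Int, (a.insert w1[index] i).keys = a.keys ++ [w1[index]] :=
          fun i => PySem.Dict.keys_insert_of_not_contains a i hcontf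
        have hremc : remNew a.keys (w1.drop index)
            = w1[index] :: remNew (a.keys ++ [w1[index]]) (w1.drop (index+1)) := by
          rw [hdrop, remNew_cons, if_neg hnotmem]
        rw [hremc, PySem.List.foldl_if_eq_foldl_filter (fun i => !(PySem.List.pyGetD u i false))
          (fun result i => max result (pyBacktrack w1 w2 (index + 1) (a.insert w1[index] i) (u.set i.toNat true)))]
        rw [List.length_cons, perms_succ_nodup _ (poolOf_nodup u), List.foldl_flatMap]
        refine foldl_eq_of_inv _ _ (fun b => 0 ≤ b) (poolOf u) ?_ 0 (le_refl 0)
        intro b hb i hi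
        have hif : i ∈ PySem.List.pyRange 0 10 ∧ (!(PySem.List.pyGetD u i false)) = true :=
          List.mem_filter.mp hi
        have hib : 0 ≤ i ∧ i < 10 := PySem.List.mem_pyRange_one.mp hif.1
        have hitn : i.toNat < u.length := by omega
        have hbt := ih (index+1) (a.insert w1[index] i) (u.set i.toNat true)
          (by omega) (by omega) (by rw [List.length_set]; exact hu) (hcov' i)
        rw [hkeys i, poolOf_set u i hib.1 hitn] at hbt
        constructor
        · rw [List.foldl_map]
          have hzip : ∀ p : List Int,
              extendD a ((w1[index] :: remNew (a.keys ++ [w1[index]]) (w1.drop (index+1))).zip (i :: p))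
                = extendD (a.insert w1[index] i) ((remNew (a.keys ++ [w1[index]]) (w1.drop (index+1))).zip p) := by
            intro p; rfl
          have hshift := foldl_max_shift
            (fun p => gval w1 w2 (extendD (a.insert w1[index] i) ((remNew (a.keys ++ [w1[index]]) (w1.drop (index+1))).zip p)))
            (PySem.List.permutations ((poolOf u).erase i) (remNew (a.keys ++ [w1[index]]) (w1.drop (index+1))).length)
            b hb
          simp only [List.zip_cons_cons]
          rw [show (fun (best : Int) (p : List Int) =>
                max best (gval w1 w2 (extendD a ((w1[index], i) :: (remNew (a.keys ++ [w1[index]]) (w1.drop (index+1))).zip p))))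
              = (fun (best : Int) (p : List Int) =>
                max best (gval w1 w2 (extendD (a.insert w1[index] i) ((remNew (a.keys ++ [w1[index]]) (w1.drop (index+1))).zip p)))) from rfl]
          rw [hshift, hbt]
        · exact le_trans hb (le_max_left _ _)

lemma foldl_add_eq_remNew (l : List Char) : ∀ (S : List Char),
    List.foldl PySem.Set.add S l = S ++ remNew S l := by
  induction l with
  | nil => intro S; simp [remNew]
  | cons c t ih =>
    intro S
    by_cases hc : c ∈ S
    · have h1 : PySem.Set.add S c = S := by simp [PySem.Set.add, hc]
      simp [remNew, hc, h1, ih]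
    · have h1 : PySem.Set.add S c = S ++ [c] := by simp [PySem.Set.add, hc]
      simp [remNew, hc, h1, ih]

lemma dedup_eq_remNew (l : List Char) : PySem.List.dedup l = remNew [] l := by
  rw [PySem.List.dedup_eq_ofList, PySem.Set.ofList_eq_foldl, foldl_add_eq_remNew]
  simp

lemma pair_eq (x y : String) (hkey : sortedJoin x = sortedJoin y) :
    max_square_pair x y = best_square_pair x y := by
  have hsorted : PySem.List.sorted x.toList (fun c => c) false
      = PySem.List.sorted y.toList (fun c => c) false := by
    have := congrArg String.toList hkey
    simpa [sortedJoin] using this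
  have hperm : x.toList.Perm y.toList :=
    (PySem.List.sorted_id_eq_sorted_id_iff_perm _ _).mp hsorted
  have hsub : ∀ c ∈ y.toList, c ∈ x.toList := fun c hc => hperm.mem_iff.mpr hc
  unfold max_square_pair
  rw [bt_eq x.toList y.toList hsub x.toList.length 0 PySem.Dict.empty (List.replicate 10 false)
    (by omega) (by omega) (by simp) (by simp)]
  have hkeys : (PySem.Dict.empty : PySem.Dict Char Int).keys = [] := rfl
  rw [List.drop_zero, hkeys, ← dedup_eq_remNew]
  have hpool : poolOf (List.replicate 10 false) = PySem.List.pyRange 0 10 := by decide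
  rw [hpool]
  unfold best_square_pair
  refine (foldl_eq_of_inv _ _ (fun b => 0 ≤ b) _ ?_ 0 (le_refl 0)).symm
  intro b hb perm _
  have hof : PySem.Dict.ofList ((PySem.List.dedup x.toList).zip perm)
      = extendD PySem.Dict.empty ((PySem.List.dedup x.toList).zip perm) := rfl
  constructor
  · show _ = max b (gval x.toList y.toList _)
    rw [← hof]
    unfold gval
    dsimp only
    split_ifs with h1 h2
    · exact (max_eq_left hb).symm
    · rfl
    · exact (max_eq_left hb).symm
  · dsimp only
    split_ifs with h1 h2
    · exact hb
    · exact le_trans hb (le_max_left _ _)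
    · exact hb

lemma group_inv (ws : List String) (d : PySem.Dict String (List String))
    (hd : ∀ p ∈ d.items, ∀ w ∈ p.2, sortedJoin w = p.1) :
    ∀ p ∈ (ws.foldl (fun d word =>
      let sw := sortedJoin word
      let d := if d.contains sw then d else d.insert sw ([] : List String)
      d.insert sw (d.getD sw [] ++ [word])) d).items, ∀ w ∈ p.2, sortedJoin w = p.1 := by
  induction ws generalizing d with
  | nil => simpa using hd
  | cons word t ih =>
    simp only [List.foldl_cons]
    apply ih
    intro p hp w hw
    set sw := sortedJoin word with hsw
    set d1 := if d.contains sw then d else d.insert sw ([] : List String) with hd1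
    have hd1inv : ∀ p ∈ d1.items, ∀ w ∈ p.2, sortedJoin w = p.1 := by
      rw [hd1]
      split_ifs with hc
      · exact hd
      · intro p hp w hw
        rcases (PySem.Dict.mem_items_insert _ _ _ _).mp hp with h | h
        · rw [h] at hw; simp at hw
        · exact hd p h.1 w hw
    rcases (PySem.Dict.mem_items_insert _ _ _ _).mp hp with h | h
    · subst h
      simp only []
      rcases List.mem_append.mp hw with h2 | h2
      · cases hg : d1.get? sw with
        | none => rw [PySem.Dict.getD_of_get?_eq_none _ _ hg] at h2; simp at h2
        | some l =>
          rw [PySem.Dict.getD_of_get?_eq_some _ _ hg] at h2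
          exact hd1inv (sw, l) (PySem.Dict.mem_items_of_get?_eq_some _ hg) w h2
      · simp at h2
        rw [h2, hsw]
    · exact hd1inv p h.1 w hw

theorem main_eq (words : List String) :
    find_square_anagram_pairs words = find_square_anagram_pairs_alt words := by
  unfold find_square_anagram_pairs find_square_anagram_pairs_alt
  have hstep : ∀ (d : PySem.Dict String (List String)) (word : String),
      (let sw := sortedJoin word
       let d' := d.setdefault sw ([] : List String)
       d'.insert sw (d'.getD sw [] ++ [word]))
      = (let sw := sortedJoin word
         let d' := if d.contains sw then d else d.insert sw ([] : List String)
         d'.insert sw (d'.getD sw [] ++ [word])) := by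
    intro d word
    dsimp only
    by_cases hc : d.contains (sortedJoin word)
    · rw [PySem.Dict.setdefault_of_contains _ _ hc, if_pos hc]
    · rw [PySem.Dict.setdefault_of_not_contains _ _ (by simp [hc]), if_neg hc]
  rw [PySem.List.foldl_congr_mem words _ _ PySem.Dict.empty (fun acc x _ => hstep acc x)]
  set d := words.foldl (fun d word =>
      let sw := sortedJoin word
      let d := if d.contains sw then d else d.insert sw ([] : List String)
      d.insert sw (d.getD sw [] ++ [word])) PySem.Dict.empty with hdd
  have hinv : ∀ p ∈ d.items, ∀ w ∈ p.2, sortedJoin w = p.1 :=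
    group_inv words PySem.Dict.empty (by
      intro p hp
      rw [show (PySem.Dict.empty : PySem.Dict String (List String)).items = [] from rfl] at hp
      cases hp)
  apply PySem.List.foldl_congr_mem
  intro acc wl hwl
  obtain ⟨p, hp, hpwl⟩ := List.mem_map.mp hwl
  subst hpwl
  apply PySem.List.foldl_congr_mem
  intro acc2 i hi
  apply PySem.List.foldl_congr_mem
  intro acc3 j hj
  have hib := PySem.List.mem_pyRange_one.mp hi
  have hjb := PySem.List.mem_pyRange_one.mp hj
  have hmi : PySem.List.pyGetD p.2 i "" ∈ p.2 := by
    rw [PySem.List.pyGetD_eq_getElem p.2 "" hib.1 hib.2]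
    exact List.getElem_mem _
  have hmj : PySem.List.pyGetD p.2 j "" ∈ p.2 := by
    rw [PySem.List.pyGetD_eq_getElem p.2 "" (by omega) hjb.2]
    exact List.getElem_mem _
  rw [pair_eq _ _ (by rw [hinv p hp _ hmi, hinv p hp _ hmj])]

-- ===== VERDICT (by name: the statement is the Claim_ definition above) =====
theorem find_square_anagram_pairs_spec : Claim_equal_find_square_anagram_pairs := by
  intro words _dom _pre
  unfold Spec_find_square_anagram_pairs
  exact main_eq words
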